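-- pv_equiv track=rewrite | github.com/johanesalxd/random-stuff | bq_discovery/bq_discovery/iam_scanner.py | _parse_resource_name
-- ===== SOURCE A (Python) =====
-- def _parse_resource_name(resource: str) -> tuple[str, str, str | None]:
--     """Parse a BigQuery full resource name into components.
--
--     Args:
--         resource: Full resource name, e.g.:
--             //bigquery.googleapis.com/projects/p/datasets/d
--             //bigquery.googleapis.com/projects/p/datasets/d/tables/t
--
--     Returns:
--         Tuple of (project_id, dataset_id, resource_id or None).
--     """
--     parts = resource.split("/")
--     project_id = ""
--     dataset_id = ""
--     resource_id = None
--
--     for i, part in enumerate(parts):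
--         if part == "projects" and i + 1 < len(parts):
--             project_id = parts[i + 1]
--         elif part == "datasets" and i + 1 < len(parts):
--             dataset_id = parts[i + 1]
--         elif part == "tables" and i + 1 < len(parts):
--             resource_id = parts[i + 1]
--
--     return project_id, dataset_id, resource_id
-- ===== SOURCE B (Python) =====
-- def _parse_resource_name(resource: str) -> tuple[str, str, str | None]:
--     """Parse a BigQuery full resource name into components.
--
--     Backward search: for each keyword independently, scan the parts from the
--     end and return the element following the last occurrence of the keyword
--     (early exit).  Scanning from the end is correct because the forward scan
--     in the original overwrites on every occurrence, so only the last
--     occurrence (with a successor) determines the result.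
--     """
--     parts = resource.split("/")
--
--     def last_follower(key, default):
--         for i in range(len(parts) - 2, -1, -1):
--             if parts[i] == key:
--                 return parts[i + 1]
--         return default
--
--     return (last_follower("projects", ""),
--             last_follower("datasets", ""),
--             last_follower("tables", None))
-- ===== Notes on version B (the rewrite author's own statement) =====
-- stated objective: alternative
-- what changed: Replaces A's single forward scan that accumulates three fields with overwriting by three independent backward searches with early exit: for each keyword, scan indices from len-2 down to 0 and return the successor of the first (i.e. last) occurrence; correct because A's overwrite semantics means only the last occurrence with a successor matters.
import Mathlib
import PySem

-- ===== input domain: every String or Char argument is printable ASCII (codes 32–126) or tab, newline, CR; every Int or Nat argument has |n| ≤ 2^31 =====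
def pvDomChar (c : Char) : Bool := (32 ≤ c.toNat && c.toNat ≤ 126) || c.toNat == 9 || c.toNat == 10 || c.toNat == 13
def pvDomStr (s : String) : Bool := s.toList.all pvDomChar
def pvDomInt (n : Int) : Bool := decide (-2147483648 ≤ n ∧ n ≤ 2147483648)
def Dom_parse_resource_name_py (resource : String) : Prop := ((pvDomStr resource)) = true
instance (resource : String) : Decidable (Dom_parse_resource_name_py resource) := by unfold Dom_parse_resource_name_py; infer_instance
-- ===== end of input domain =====

-- B replaces A's single forward overwrite-scan by three independent backward searches with early exit; alternative decomposition, same cost.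


-- ===== PORT A =====
def parse_resource_name_py (resource : String) : String × String × Option String :=
  let parts := (PySem.Str.split? resource "/").getD []
  (PySem.List.enumerate parts 0).foldl
    (fun st p =>
      if p.2 == "projects" ∧ p.1 + 1 < (parts.length : Int) then
        (PySem.List.pyGetD parts (p.1 + 1) "", st.2.1, st.2.2)
      else if p.2 == "datasets" ∧ p.1 + 1 < (parts.length : Int) then
        (st.1, PySem.List.pyGetD parts (p.1 + 1) "", st.2.2)
      else if p.2 == "tables" ∧ p.1 + 1 < (parts.length : Int) then
        (st.1, st.2.1, some (PySem.List.pyGetD parts (p.1 + 1) ""))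
      else st)
    ("", "", none)

-- ===== PORT B =====
-- B's inner loop: scan the given (descending) index list; on the first i with
-- parts[i] == key, return parts[i+1] (Python's early 'return'); none = fell through.
def pvLastFollowerAux (parts : List String) (key : String) : List Int → Option String
  | [] => none
  | i :: rest =>
      if PySem.List.pyGetD parts i "" == key then some (PySem.List.pyGetD parts (i + 1) "")
      else pvLastFollowerAux parts key rest

def parse_resource_name_py_alt (resource : String) : String × String × Option String :=
  let parts := (PySem.Str.split? resource "/").getD []
  let idxs := PySem.List.pyRange ((parts.length : Int) - 2) (-1) (-1)
  ((pvLastFollowerAux parts "projects" idxs).getD "",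
   (pvLastFollowerAux parts "datasets" idxs).getD "",
   pvLastFollowerAux parts "tables" idxs)

-- ===== PRECONDITION & SPEC =====
def Spec_parse_resource_name_py (resource : String) (out : String × String × Option String) : Prop := out = parse_resource_name_py_alt resource
instance (resource : String) (out : String × String × Option String) : Decidable (Spec_parse_resource_name_py resource out) := by unfold Spec_parse_resource_name_py; infer_instance

-- ===== CLAIM (what is proved, stated in full; the proofs are below) =====
def Claim_equal_parse_resource_name_py : Prop := ∀ (resource : String), Dom_parse_resource_name_py resource → Spec_parse_resource_name_py resource (parse_resource_name_py resource)

-- ===== LEMMAS AND PROOFS =====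

-- A's loop body, with the whole parts list and the indexed access, as a named step function
def pvStepA (parts : List String) (st : String × String × Option String) (p : Int × String) :
    String × String × Option String :=
  if p.2 == "projects" ∧ p.1 + 1 < (parts.length : Int) then
    (PySem.List.pyGetD parts (p.1 + 1) "", st.2.1, st.2.2)
  else if p.2 == "datasets" ∧ p.1 + 1 < (parts.length : Int) then
    (st.1, PySem.List.pyGetD parts (p.1 + 1) "", st.2.2)
  else if p.2 == "tables" ∧ p.1 + 1 < (parts.length : Int) then
    (st.1, st.2.1, some (PySem.List.pyGetD parts (p.1 + 1) ""))
  else st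

-- the same update expressed on an adjacent pair (key, successor)
def pvStepZ (st : String × String × Option String) (kv : String × String) :
    String × String × Option String :=
  if kv.1 == "projects" then (kv.2, st.2.1, st.2.2)
  else if kv.1 == "datasets" then (st.1, kv.2, st.2.2)
  else if kv.1 == "tables" then (st.1, st.2.1, some kv.2)
  else st

-- value following the LAST pair whose key matches
def pvLast? (key : String) (ps : List (String × String)) : Option String :=
  (ps.reverse.find? (fun kv => kv.1 == key)).map (·.2)

-- A's enumerate-and-index loop over the suffix l of pre ++ l is the pvStepZ-fold over l's adjacent pairs
lemma pvFoldA_eq_foldZ (l pre : List String) (st : String × String × Option String) :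
    (PySem.List.enumerate l (pre.length : Int)).foldl (pvStepA (pre ++ l)) st
      = (l.zip l.tail).foldl pvStepZ st := by
  induction l generalizing pre st with
  | nil => simp [PySem.List.enumerate_nil]
  | cons x xs ih =>
    rw [PySem.List.enumerate_cons, List.foldl_cons]
    cases xs with
    | nil =>
      simp [pvStepA, PySem.List.enumerate_nil]
    | cons y ys =>
      have hacc : PySem.List.pyGetD (pre ++ x :: y :: ys) ((pre.length : Int) + 1) "" = y := by
        have : ((pre.length : Int) + 1) = ((pre.length + 1 : Nat) : Int) := by push_cast; ring
        rw [this, PySem.List.pyGetD_natCast]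
        simp [List.getD]
      have hg : (pre.length : Int) + 1 < ((pre ++ x :: y :: ys).length : Int) := by
        simp
      have hstep : pvStepA (pre ++ x :: y :: ys) st ((pre.length : Int), x) = pvStepZ st (x, y) := by
        simp only [pvStepA, pvStepZ, hacc, hg, and_true]
      have hpre : ((pre ++ [x]).length : Int) = (pre.length : Int) + 1 := by simp
      have := ih (pre ++ [x]) (pvStepZ st (x, y))
      rw [hpre] at this
      simp only [List.append_assoc, List.singleton_append] at this
      rw [hstep]
      simpa using this

-- the pvStepZ fold reads off the last matching pair for each of the three keywords
lemma pvFoldZ_eq_last (ps : List (String × String)) (st : String × String × Option String) :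
    ps.foldl pvStepZ st
      = ((pvLast? "projects" ps).getD st.1,
         (pvLast? "datasets" ps).getD st.2.1,
         (pvLast? "tables" ps).or st.2.2) := by
  induction ps generalizing st with
  | nil => simp [pvLast?]
  | cons kv ps ih =>
    rw [List.foldl_cons, ih]
    have hlast : ∀ key, pvLast? key (kv :: ps)
        = (pvLast? key ps).or (if kv.1 == key then some kv.2 else none) := by
      intro key
      simp only [pvLast?, List.reverse_cons, List.find?_append]
      cases h : (ps.reverse.find? (fun x => x.1 == key)) with
      | none => cases e : kv.1 == key <;> simp_all
      | some v => simp
    simp only [hlast]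
    cases h1 : pvLast? "projects" ps <;> cases h2 : pvLast? "datasets" ps <;>
      cases h3 : pvLast? "tables" ps <;>
      simp only [pvStepZ, Option.or, Option.getD] <;>
      by_cases e1 : kv.1 == "projects" <;> by_cases e2 : kv.1 == "datasets" <;>
      by_cases e3 : kv.1 == "tables" <;>
      simp_all

-- B's backward index scan over [m-1, …, 0] finds the last matching pair among the first m
lemma pvFollow_eq_last (parts : List String) (key : String) (m : Nat)
    (hm : m ≤ (parts.zip parts.tail).length) :
    pvLastFollowerAux parts key (PySem.List.pyRange ((m : Int) - 1) (-1) (-1))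
      = pvLast? key ((parts.zip parts.tail).take m) := by
  induction m with
  | zero =>
    rw [PySem.List.pyRange_neg_one_eq_nil (by norm_num)]
    simp [pvLastFollowerAux, pvLast?]
  | succ m ih =>
    have hlen : m < (parts.zip parts.tail).length := by omega
    have hlt : m < parts.length := by
      simp [List.length_zip] at hlen; omega
    have hlt1 : m + 1 < parts.length := by
      simp [List.length_zip, List.length_tail] at hlen; omega
    have hrange : PySem.List.pyRange (((m + 1 : Nat) : Int) - 1) (-1) (-1)
        = (m : Int) :: PySem.List.pyRange ((m : Int) - 1) (-1) (-1) := by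
      have : (((m + 1 : Nat) : Int) - 1) = (m : Int) := by push_cast; ring
      rw [this, PySem.List.pyRange_neg_one_cons (by omega)]
    rw [hrange]
    have hget : PySem.List.pyGetD parts ((m : Int)) "" = parts[m] := by
      rw [PySem.List.pyGetD_natCast]; simp [List.getD, hlt]
    have hget1 : PySem.List.pyGetD parts ((m : Int) + 1) "" = parts[m + 1] := by
      have : ((m : Int) + 1) = ((m + 1 : Nat) : Int) := by push_cast; ring
      rw [this, PySem.List.pyGetD_natCast]; simp [List.getD, hlt1]
    have htake : (parts.zip parts.tail).take (m + 1)
        = (parts.zip parts.tail).take m ++ [(parts.zip parts.tail)[m]] := by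
      rw [List.take_add_one]
      simp [List.getElem?_eq_getElem hlen]
    have hzip : (parts.zip parts.tail)[m] = (parts[m], parts[m + 1]) := by
      rw [List.getElem_zip]
      congr 1
      rw [List.getElem_tail]
    rw [htake]
    simp only [pvLastFollowerAux, hget, hget1, pvLast?, List.reverse_append,
      List.reverse_singleton, List.singleton_append, List.find?]
    rw [hzip]
    by_cases e : parts[m] == key
    · simp [e]
    · simp only [e, Bool.false_eq_true, if_false]
      rw [ih (by omega)]
      simp [pvLast?]

-- combine: both ports compute the triple of last-followers over the adjacent pairs
lemma pvPorts_eq (parts : List String) :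
    (PySem.List.enumerate parts 0).foldl (pvStepA parts) ("", "", none)
      = ((pvLastFollowerAux parts "projects"
            (PySem.List.pyRange ((parts.length : Int) - 2) (-1) (-1))).getD "",
         (pvLastFollowerAux parts "datasets"
            (PySem.List.pyRange ((parts.length : Int) - 2) (-1) (-1))).getD "",
         pvLastFollowerAux parts "tables"
            (PySem.List.pyRange ((parts.length : Int) - 2) (-1) (-1))) := by
  have hA := pvFoldA_eq_foldZ parts [] ("", "", none)
  simp only [List.length_nil, Nat.cast_zero, List.nil_append] at hA
  rw [hA, pvFoldZ_eq_last]
  have hm : ((parts.zip parts.tail).length : Int) - 1 = (parts.length : Int) - 2 ∨ parts = [] := by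
    cases parts with
    | nil => right; rfl
    | cons x xs =>
      left
      simp [List.length_zip]
      omega
  cases hm with
  | inl h =>
    have hB : ∀ key, pvLastFollowerAux parts key
        (PySem.List.pyRange ((parts.length : Int) - 2) (-1) (-1))
          = pvLast? key (parts.zip parts.tail) := by
      intro key
      have hk := pvFollow_eq_last parts key ((parts.zip parts.tail).length) (le_refl _)
      rw [List.take_length, h] at hk
      exact hk
    rw [hB, hB, hB]
    simp
  | inr h =>
    subst h
    decide

-- ===== VERDICT (by name: the statement is the Claim_ definition above) =====
theorem parse_resource_name_py_spec : Claim_equal_parse_resource_name_py := by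
  intro resource _
  show parse_resource_name_py resource = parse_resource_name_py_alt resource
  simp only [parse_resource_name_py, parse_resource_name_py_alt]
  exact pvPorts_eq _
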